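-- pv_equiv track=rewrite | github.com/x-INFiN1TY-x/TenderIntel | src/tenderintel/search/sqlite_fts5_engine.py | _build_enhanced_fts5_query
-- ===== SOURCE A (Python) =====
-- from typing import Dict, Any, List, Optional
--
-- def _build_enhanced_fts5_query(phrases: List[str]) -> str:
--     """Build optimized FTS5 MATCH query with phrase prioritization"""
--
--     if not phrases:
--         return ""
--
--     query_parts = []
--
--     # Sort phrases by specificity (word count descending)
--     sorted_phrases = sorted(phrases, key=lambda p: len(p.split()), reverse=True)
--
--     for phrase in sorted_phrases:
--         if " " in phrase:
--             # Multi-word phrase: exact phrase matching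
--             query_parts.append(f'"{phrase}"')
--         else:
--             # Single word: flexible matching
--             query_parts.append(phrase)
--
--     return " OR ".join(query_parts)
-- ===== SOURCE B (Python) =====
-- def _build_enhanced_fts5_query(phrases):
--     """Build FTS5 MATCH query: bucket phrases by word count, emit buckets from highest count down."""
--     if not phrases:
--         return ""
--     buckets = {}
--     max_count = 0
--     for p in phrases:
--         c = len(p.split())
--         buckets.setdefault(c, []).append(p)
--         if c > max_count:
--             max_count = c
--     parts = []
--     for c in range(max_count, -1, -1):
--         for p in buckets.get(c, []):
--             parts.append('"' + p + '"' if " " in p else p)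
--     return " OR ".join(parts)
-- ===== Notes on version B (the rewrite author's own statement) =====
-- stated objective: alternative
-- what changed: Replaces the comparison sort by word count with a single-pass bucket dict keyed by len(p.split()) plus a running maximum, read out from the highest count down to 0 (insertion order within each bucket reproduces the stable sort).
import Mathlib
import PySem

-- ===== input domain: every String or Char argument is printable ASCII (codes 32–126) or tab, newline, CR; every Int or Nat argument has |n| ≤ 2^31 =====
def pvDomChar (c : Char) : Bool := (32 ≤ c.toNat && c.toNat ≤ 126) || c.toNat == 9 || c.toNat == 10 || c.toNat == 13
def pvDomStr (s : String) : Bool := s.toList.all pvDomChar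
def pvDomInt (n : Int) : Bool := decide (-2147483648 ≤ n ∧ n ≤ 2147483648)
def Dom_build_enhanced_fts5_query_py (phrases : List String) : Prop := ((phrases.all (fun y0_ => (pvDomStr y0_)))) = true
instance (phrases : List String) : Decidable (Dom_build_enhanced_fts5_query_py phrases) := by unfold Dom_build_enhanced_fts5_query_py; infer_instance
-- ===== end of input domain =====

-- B replaces A's comparison sort with a one-pass word-count bucket dict read out from the
-- highest count down (objective: alternative decomposition, same observable result).

-- shared helpers: len(p.split()) and the loop-body rendering (f'"{phrase}"' is hand-ported
-- as string concatenation; exact on the ASCII domain)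
def pvWc (p : String) : Int := ((PySem.Str.split₀ p).length : Int)
def pvRender (phrase : String) : String :=
  if PySem.Str.isIn " " phrase then "\"" ++ phrase ++ "\"" else phrase

-- ===== PORT A =====
def build_enhanced_fts5_query_py (phrases : List String) : String :=
  if phrases.isEmpty then ""
  else
    -- sorted(phrases, key=lambda p: len(p.split()), reverse=True)
    let sorted_phrases := PySem.List.sorted phrases pvWc true
    -- for phrase in sorted_phrases: query_parts.append(...)
    let query_parts := sorted_phrases.foldl (fun acc phrase => acc ++ [pvRender phrase]) []
    PySem.Str.join " OR " query_parts

-- ===== PORT B =====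
def build_enhanced_fts5_query_py_alt (phrases : List String) : String :=
  if phrases.isEmpty then ""
  else
    -- one pass: buckets.setdefault(c, []).append(p); max_count running maximum
    let st := phrases.foldl
      (fun s p =>
        (s.1.modify (pvWc p) [] (fun l => l ++ [p]),
         if s.2 < pvWc p then pvWc p else s.2))
      ((PySem.Dict.empty : PySem.Dict Int (List String)), (0 : Int))
    -- for c in range(max_count, -1, -1): for p in buckets.get(c, []): parts.append(...)
    let parts := (PySem.List.pyRange st.2 (-1) (-1)).foldl
      (fun parts c => (st.1.getD c []).foldl (fun ps p => ps ++ [pvRender p]) parts) []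
    PySem.Str.join " OR " parts

-- ===== PRECONDITION & SPEC =====
def Spec_build_enhanced_fts5_query_py (phrases : List String) (out : String) : Prop := out = build_enhanced_fts5_query_py_alt phrases
instance (phrases : List String) (out : String) : Decidable (Spec_build_enhanced_fts5_query_py phrases out) := by unfold Spec_build_enhanced_fts5_query_py; infer_instance

-- ===== CLAIM (what is proved, stated in full; the proofs are below) =====
def Claim_equal_build_enhanced_fts5_query_py : Prop := ∀ (phrases : List String), Dom_build_enhanced_fts5_query_py phrases → Spec_build_enhanced_fts5_query_py phrases (build_enhanced_fts5_query_py phrases)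

-- ===== LEMMAS AND PROOFS =====

-- insertBy walks past a block on which `before` is false
theorem pv_insertBy_append {α : Type} (bef : α → α → Bool) (x : α) (as bs : List α)
    (h : ∀ a ∈ as, bef x a = false) :
    PySem.List.insertBy bef x (as ++ bs) = as ++ PySem.List.insertBy bef x bs := by
  induction as with
  | nil => simp
  | cons a t ih =>
    have ha : bef x a = false := h a (by simp)
    simp [PySem.List.insertBy, ha, ih (fun a h' => h a (by simp [h']))]

-- insertBy puts x in front when `before` holds of every element (the head suffices)
theorem pv_insertBy_front {α : Type} (bef : α → α → Bool) (x : α) (bs : List α)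
    (h : ∀ b ∈ bs, bef x b = true) :
    PySem.List.insertBy bef x bs = x :: bs := by
  cases bs with
  | nil => simp [PySem.List.insertBy]
  | cons b t => simp [PySem.List.insertBy, h b (by simp)]

-- inserting x into a concatenation of strictly-descending buckets appends it to its bucket
theorem pv_insertBy_buckets (x : String) (cs : List Int) (f : Int → List String)
    (hdesc : cs.Pairwise (· > ·)) (hmem : pvWc x ∈ cs)
    (hf : ∀ c ∈ cs, ∀ y ∈ f c, pvWc y = c) :
    PySem.List.insertBy (fun a b => decide (pvWc b < pvWc a)) x (cs.flatMap f)
      = cs.flatMap (fun c => f c ++ if pvWc x = c then [x] else []) := by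
  induction cs with
  | nil => simp at hmem
  | cons c cs ih =>
    have hgt : ∀ c' ∈ cs, c > c' := (List.pairwise_cons.mp hdesc).1
    have hskip : ∀ a ∈ f c, (fun a b => decide (pvWc b < pvWc a)) x a = false := by
      intro a ha
      have := hf c (by simp) a ha
      simp only [this, decide_eq_false_iff_not, not_lt]
      rcases List.mem_cons.mp hmem with h | h
      · omega
      · exact le_of_lt (hgt _ h)
    rw [List.flatMap_cons, pv_insertBy_append _ _ _ _ hskip]
    rcases eq_or_ne (pvWc x) c with hk | hk
    · -- x belongs to the head bucket: everything after has strictly smaller key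
      have hfront : ∀ b ∈ cs.flatMap f, (fun a b => decide (pvWc b < pvWc a)) x b = true := by
        intro b hb
        rcases List.mem_flatMap.mp hb with ⟨c', hc', hbc'⟩
        have := hf c' (by simp [hc']) b hbc'
        simp only [this, decide_eq_true_eq, hk]
        exact hgt _ hc'
      rw [pv_insertBy_front _ _ _ hfront, List.flatMap_cons]
      have hnot : ∀ c' ∈ cs, ¬ (pvWc x = c') := by
        intro c' hc' he
        have := hgt _ hc'; omega
      have hsame : (cs.flatMap (fun c => f c ++ if pvWc x = c then [x] else [])) = cs.flatMap f := by
        apply List.flatMap_congr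
        intro c' hc'
        simp [hnot c' hc']
      rw [hsame]
      simp [hk]
    · -- x belongs further down
      have hx : pvWc x ∈ cs := by
        rcases List.mem_cons.mp hmem with h | h
        · exact absurd h hk
        · exact h
      rw [ih (List.pairwise_cons.mp hdesc).2 hx (fun c' hc' => hf c' (by simp [hc']))]
      simp [List.flatMap_cons, hk]

-- the insertion-sort fold over strictly-descending buckets is bucket-filter concatenation
theorem pv_fold_insert_eq_buckets (xs : List String) (cs : List Int)
    (hdesc : cs.Pairwise (· > ·)) (hmem : ∀ p ∈ xs, pvWc p ∈ cs) :
    xs.foldl (fun acc x => PySem.List.insertBy (fun a b => decide (pvWc b < pvWc a)) x acc) []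
      = cs.flatMap (fun c => xs.filter (fun p => pvWc p == c)) := by
  induction xs using List.reverseRecOn with
  | nil => simp
  | append_singleton xs x ih =>
    rw [List.foldl_append, List.foldl_cons, List.foldl_nil,
      ih (fun p hp => hmem p (by simp [hp])),
      pv_insertBy_buckets x cs _ hdesc (hmem x (by simp))
        (by intro c hc y hy
            have := List.of_mem_filter hy
            simpa using this)]
    apply List.flatMap_congr
    intro c hc
    by_cases hxc : pvWc x = c <;> simp [List.filter_append, hxc]

-- sorted(phrases, key=wc, reverse=True) = buckets read from any strictly-descending cover
theorem pv_sorted_eq_buckets (xs : List String) (cs : List Int)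
    (hdesc : cs.Pairwise (· > ·)) (hmem : ∀ p ∈ xs, pvWc p ∈ cs) :
    PySem.List.sorted xs pvWc true = cs.flatMap (fun c => xs.filter (fun p => pvWc p == c)) := by
  rw [PySem.List.sorted_rev_eq_foldl_insertBy, pv_fold_insert_eq_buckets xs cs hdesc hmem]

-- the dict fold groups: bucket c is the filter of the input
theorem pv_dict_getD (xs : List String) (c : Int) :
    (xs.foldl (fun d p => d.modify (pvWc p) [] (fun l => l ++ [p]))
        (PySem.Dict.empty : PySem.Dict Int (List String))).getD c []
      = xs.filter (fun p => pvWc p == c) := by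
  have h := PySem.Dict.getD_foldl_modify_append (xs.map (fun p => (pvWc p, p)))
    (PySem.Dict.empty : PySem.Dict Int (List String)) c
  rw [List.foldl_map] at h
  simpa [List.filter_map, Function.comp_def] using h

-- the running maximum bounds every key
theorem pv_le_fold_max (xs : List String) (a : Int) :
    (∀ p ∈ xs, pvWc p ≤ xs.foldl (fun m p => if m < pvWc p then pvWc p else m) a)
      ∧ a ≤ xs.foldl (fun m p => if m < pvWc p then pvWc p else m) a := by
  induction xs generalizing a with
  | nil => simp
  | cons x t ih =>
    constructor
    · intro p hp
      rcases List.mem_cons.mp hp with hp | hp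
      · subst hp
        have h2 := (ih (if a < pvWc p then pvWc p else a)).2
        simp only [List.foldl_cons]
        rcases lt_or_ge a (pvWc p) with hap | hap
        · rw [if_pos hap] at h2 ⊢; omega
        · rw [if_neg (not_lt.mpr hap)] at h2 ⊢; omega
      · exact (ih _).1 p hp
    · have h2 := (ih (if a < pvWc x then pvWc x else a)).2
      simp only [List.foldl_cons]
      rcases lt_or_ge a (pvWc x) with hap | hap
      · rw [if_pos hap] at h2 ⊢; omega
      · rw [if_neg (not_lt.mpr hap)] at h2 ⊢; omega

-- the one-pass (dict, max) fold splits into its two component folds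
theorem pv_split_fold (phrases : List String) :
    phrases.foldl
        (fun s p =>
          (s.1.modify (pvWc p) [] (fun l => l ++ [p]),
           if s.2 < pvWc p then pvWc p else s.2))
        ((PySem.Dict.empty : PySem.Dict Int (List String)), (0 : Int))
      = (phrases.foldl (fun d p => d.modify (pvWc p) [] (fun l => l ++ [p])) PySem.Dict.empty,
         phrases.foldl (fun m p => if m < pvWc p then pvWc p else m) 0) :=
  PySem.List.foldl_prod_mk (fun d p => d.modify (pvWc p) [] (fun l => l ++ [p]))
    (fun m p => if m < pvWc p then pvWc p else m) phrases PySem.Dict.empty 0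

-- the countdown range is strictly descending
theorem pv_pyRange_desc (a b : Int) : (PySem.List.pyRange a b (-1)).Pairwise (· > ·) := by
  rw [PySem.List.pyRange_neg_one_eq_reverse, List.pairwise_reverse]
  exact PySem.List.pairwise_lt_pyRange_one (b + 1) (a + 1)

-- ===== VERDICT (by name: the statement is the Claim_ definition above) =====
theorem build_enhanced_fts5_query_py_spec : Claim_equal_build_enhanced_fts5_query_py := by
  intro phrases _
  unfold Spec_build_enhanced_fts5_query_py build_enhanced_fts5_query_py build_enhanced_fts5_query_py_alt
  by_cases he : phrases.isEmpty
  · simp [he]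
  · simp only [he, Bool.false_eq_true, if_false]
    rw [pv_split_fold]
    dsimp only
    set mx := phrases.foldl (fun m p => if m < pvWc p then pvWc p else m) 0 with hmx
    have hbound : ∀ p ∈ phrases, pvWc p ∈ PySem.List.pyRange mx (-1) (-1) := by
      intro p hp
      rw [PySem.List.mem_pyRange_neg_one]
      refine ⟨by unfold pvWc; omega, (pv_le_fold_max phrases 0).1 p hp⟩
    rw [pv_sorted_eq_buckets phrases _ (pv_pyRange_desc mx (-1)) hbound]
    simp only [PySem.List.foldl_append_singleton_eq_map, pv_dict_getD]
    rw [PySem.List.foldl_append_eq_flatMap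
      (fun c => List.map pvRender (List.filter (fun p => pvWc p == c) phrases))]
    simp [List.map_flatMap]
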